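-- pv_equiv track=rewrite | github.com/LIU-6/task-pilot | task_pilot.py | normalize_legacy_flags
-- ===== SOURCE A (Python) =====
-- def normalize_legacy_flags(argv: list[str]) -> list[str]:
--     legacy_flags = {
--         "--decision-mode": "--decision_mode",
--         "--max-continue": "--max_continue",
--         "--idle-threshold": "--idle_threshold",
--         "--poll-interval": "--poll_interval",
--         "--history-lines": "--history_lines",
--         "--rule-continue-prompt": "--rule_continue_prompt",
--         "--dry-run": "--dry_run",
--     }
--     normalized: list[str] = []
--     for arg in argv:
--         if arg in legacy_flags:
--             normalized.append(legacy_flags[arg])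
--             continue
--         for legacy_flag, new_flag in legacy_flags.items():
--             if arg.startswith(f"{legacy_flag}="):
--                 normalized.append(new_flag + arg[len(legacy_flag) :])
--                 break
--         else:
--             normalized.append(arg)
--     return normalized
-- ===== SOURCE B (Python) =====
-- def normalize_legacy_flags(argv: list[str]) -> list[str]:
--     legacy_flags = {
--         "--decision-mode": "--decision_mode",
--         "--max-continue": "--max_continue",
--         "--idle-threshold": "--idle_threshold",
--         "--poll-interval": "--poll_interval",
--         "--history-lines": "--history_lines",
--         "--rule-continue-prompt": "--rule_continue_prompt",
--         "--dry-run": "--dry_run",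
--     }
--
--     def rewrite(arg: str) -> str:
--         key, sep, value = arg.partition("=")
--         new = legacy_flags.get(key)
--         return new + sep + value if new is not None else arg
--
--     return [rewrite(arg) for arg in argv]
-- ===== Notes on version B (the rewrite author's own statement) =====
-- stated objective: simpler
-- what changed: Replaces A's exact-match special case plus an inner loop scanning all 7 flags with startswith(flag + '=') by a single partition('=') and one dict lookup of the key.
import Mathlib
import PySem

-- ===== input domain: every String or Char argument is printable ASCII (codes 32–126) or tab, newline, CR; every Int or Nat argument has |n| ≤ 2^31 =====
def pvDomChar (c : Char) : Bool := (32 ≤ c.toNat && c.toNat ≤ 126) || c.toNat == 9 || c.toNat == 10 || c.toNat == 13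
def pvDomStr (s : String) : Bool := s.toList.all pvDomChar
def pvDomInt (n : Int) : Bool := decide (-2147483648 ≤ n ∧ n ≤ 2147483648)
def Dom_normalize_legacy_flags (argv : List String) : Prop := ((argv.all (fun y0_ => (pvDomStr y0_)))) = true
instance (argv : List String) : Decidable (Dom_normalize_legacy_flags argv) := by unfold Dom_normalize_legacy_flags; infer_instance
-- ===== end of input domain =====

-- B replaces A's exact-match branch plus inner scan over all 7 flags by a single
-- partition('=') and one dict lookup of the key (objective: simpler).

-- ===== PORT A =====
-- the 'legacy_flags' dict literal (unique keys, insertion order)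
def pvLegacyList : List (String × String) :=
  [("--decision-mode", "--decision_mode"),
   ("--max-continue", "--max_continue"),
   ("--idle-threshold", "--idle_threshold"),
   ("--poll-interval", "--poll_interval"),
   ("--history-lines", "--history_lines"),
   ("--rule-continue-prompt", "--rule_continue_prompt"),
   ("--dry-run", "--dry_run")]

def pvLegacyFlags : PySem.Dict String String := PySem.Dict.mk pvLegacyList

-- the inner 'for legacy_flag, new_flag in legacy_flags.items(): if arg.startswith(...): append; break'
-- with its 'else: append(arg)' as the exhausted-list case
def pvScanA : List (String × String) → String → String
  | [], arg => arg
  | (lf, nf) :: rest, arg =>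
      if PySem.Str.startswith arg (lf ++ "=") then
        nf ++ PySem.Str.slice arg (some (PySem.Str.len lf)) none
      else pvScanA rest arg

-- 'if arg in legacy_flags: append(legacy_flags[arg]); continue' then the inner loop
def pvStepA (arg : String) : String :=
  match PySem.Dict.get? pvLegacyFlags arg with
  | some v => v
  | none => pvScanA (PySem.Dict.items pvLegacyFlags) arg

def normalize_legacy_flags (argv : List String) : List String :=
  argv.foldl (fun normalized arg => normalized ++ [pvStepA arg]) []

-- ===== PORT B =====
-- 'key, sep, value = arg.partition("=")' ported by hand on code points: partition
-- splits at the FIRST '=' (key = chars before it, sep = the '=' itself or '' if absent,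
-- value = the remainder); exact for every string.
def pvRewriteB (arg : String) : String :=
  match PySem.Dict.get? pvLegacyFlags
      (String.ofList (arg.toList.takeWhile (fun c => c != '='))) with
  | some nf => nf ++ String.ofList ((arg.toList.dropWhile (fun c => c != '=')).take 1)
                  ++ String.ofList ((arg.toList.dropWhile (fun c => c != '=')).drop 1)
  | none => arg

def normalize_legacy_flags_alt (argv : List String) : List String :=
  argv.map pvRewriteB

-- ===== PRECONDITION & SPEC =====
def Spec_normalize_legacy_flags (argv : List String) (out : List String) : Prop := out = normalize_legacy_flags_alt argv
instance (argv : List String) (out : List String) : Decidable (Spec_normalize_legacy_flags argv out) := by unfold Spec_normalize_legacy_flags; infer_instance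

-- ===== CLAIM (what is proved, stated in full; the proofs are below) =====
def Claim_equal_normalize_legacy_flags : Prop := ∀ (argv : List String), Dom_normalize_legacy_flags argv → Spec_normalize_legacy_flags argv (normalize_legacy_flags argv)

-- ===== LEMMAS AND PROOFS =====

theorem pv_takeWhile_all {p : Char → Bool} (l r : List Char) (h : ∀ c ∈ l, p c = true) :
    (l ++ r).takeWhile p = l ++ r.takeWhile p := by
  induction l with
  | nil => simp
  | cons a l ih =>
      simp only [List.cons_append, List.takeWhile_cons, h a (by simp)]
      simp [ih (fun c hc => h c (by simp [hc]))]

theorem pv_dropWhile_all {p : Char → Bool} (l r : List Char) (h : ∀ c ∈ l, p c = true) :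
    (l ++ r).dropWhile p = r.dropWhile p := by
  induction l with
  | nil => simp
  | cons a l ih =>
      simp only [List.cons_append, List.dropWhile_cons, h a (by simp)]
      simp [ih (fun c hc => h c (by simp [hc]))]

theorem pv_head_dropWhile {p : Char → Bool} (l : List Char) (c : Char) (d : List Char)
    (h : l.dropWhile p = c :: d) : p c = false := by
  induction l with
  | nil => simp at h
  | cons a l ih =>
      by_cases hp : p a
      · exact ih (by simpa [List.dropWhile_cons, hp] using h)
      · rw [List.dropWhile_cons] at h
        simp [hp] at h
        simp [← h.1, Bool.eq_false_iff.mpr hp]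

-- startswith(flag + "=") on a flag without '=' means: the text before the first '='
-- IS the flag, and an '=' is present.
theorem pv_prefix_iff (f s : List Char) (hf : '=' ∉ f) :
    (f ++ ['=']) <+: s ↔
      (s.takeWhile (fun c => c != '=') = f ∧ s.dropWhile (fun c => c != '=') ≠ []) := by
  have hall : ∀ c ∈ f, (c != '=') = true := by
    intro c hc
    simpa using fun h : c = '=' => hf (h ▸ hc)
  constructor
  · rintro ⟨t, rfl⟩
    rw [List.append_assoc]
    constructor
    · rw [pv_takeWhile_all f _ hall]; simp
    · rw [pv_dropWhile_all f _ hall]; simp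
  · rintro ⟨h1, h2⟩
    obtain ⟨c, d, hd⟩ : ∃ c d, s.dropWhile (fun c => c != '=') = c :: d := by
      cases hcd : s.dropWhile (fun c => c != '=') with
      | nil => exact absurd hcd h2
      | cons c d => exact ⟨c, d, rfl⟩
    have hc : c = '=' := by
      have := pv_head_dropWhile (p := fun c => c != '=') s c d hd
      simpa using this
    refine ⟨d, ?_⟩
    calc f ++ ['='] ++ d = f ++ ('=' :: d) := by simp
    _ = s.takeWhile (fun c => c != '=') ++ s.dropWhile (fun c => c != '=') := by
        rw [h1, hd, hc]
    _ = s := List.takeWhile_append_dropWhile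

-- a string containing '=' is none of the dict's keys (no key contains '=')
theorem pv_get?_none (s : String) (hs : '=' ∈ s.toList) :
    ∀ l : List (String × String), (∀ p ∈ l, '=' ∉ p.1.toList) →
      (PySem.Dict.mk l).get? s = none := by
  intro l
  induction l with
  | nil => intro _; rfl
  | cons kv rest ih =>
      intro hl
      obtain ⟨k, v⟩ := kv
      rw [PySem.Dict.get?_mk_cons]
      have hk : k ≠ s := by
        intro h
        exact hl (k, v) (by simp) (h ▸ hs)
      simp only [beq_iff_eq, if_neg hk]
      exact ih (fun p hp => hl p (by simp [hp]))

-- A's inner scan, on a string containing no '=', finds nothing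
theorem pv_scan_id (s : String) (h : s.toList.dropWhile (fun c => c != '=') = []) :
    ∀ l : List (String × String), pvScanA l s = s := by
  have hnotin : '=' ∉ s.toList := by
    intro hmem
    have := List.dropWhile_eq_nil_iff.mp h '=' hmem
    simp at this
  intro l
  induction l with
  | nil => rfl
  | cons kv rest ih =>
      obtain ⟨lf, nf⟩ := kv
      have hsw : PySem.Str.startswith s (lf ++ "=") = false := by
        rw [Bool.eq_false_iff]
        intro htrue
        have hpre : (lf ++ "=").toList <+: s.toList := by
          rw [PySem.Str.startswith_eq] at htrue
          exact (PySem.Chars.startswith_iff _ _).mp htrue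
        rw [String.toList_append] at hpre
        exact hnotin (hpre.subset (by simp))
      show (if PySem.Str.startswith s (lf ++ "=") then
              nf ++ PySem.Str.slice s (some (PySem.Str.len lf)) none
            else pvScanA rest s) = s
      rw [hsw]
      simpa using ih

-- A's inner scan, on a string containing an '=', agrees with B's key lookup
theorem pv_scan_eq (s : String) (hne : s.toList.dropWhile (fun c => c != '=') ≠ []) :
    ∀ l : List (String × String), (∀ p ∈ l, '=' ∉ p.1.toList) →
      pvScanA l s =
        (match (PySem.Dict.mk l).get?
            (String.ofList (s.toList.takeWhile (fun c => c != '='))) with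
         | some nf => nf ++ String.ofList ((s.toList.dropWhile (fun c => c != '=')).take 1)
                        ++ String.ofList ((s.toList.dropWhile (fun c => c != '=')).drop 1)
         | none => s) := by
  intro l
  induction l with
  | nil => intro _; rfl
  | cons kv rest ih =>
      intro hl
      obtain ⟨lf, nf⟩ := kv
      have hf : '=' ∉ lf.toList := hl (lf, nf) (by simp)
      have hiff := pv_prefix_iff lf.toList s.toList hf
      rw [PySem.Dict.get?_mk_cons]
      by_cases hkey : s.toList.takeWhile (fun c => c != '=') = lf.toList
      · -- this flag matches: both produce new_flag ++ the '=...' tail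
        have hx : (lf ++ "=").toList = lf.toList ++ ['='] := by
          rw [String.toList_append]; rfl
        have hsw : PySem.Str.startswith s (lf ++ "=") = true := by
          rw [PySem.Str.startswith_eq]
          refine (PySem.Chars.startswith_iff _ _).mpr ?_
          rw [hx]
          exact hiff.mpr ⟨hkey, hne⟩
        have hbeq : (lf == String.ofList (s.toList.takeWhile (fun c => c != '='))) = true := by
          simp [hkey]
        show (if PySem.Str.startswith s (lf ++ "=") then
                nf ++ PySem.Str.slice s (some (PySem.Str.len lf)) none
              else pvScanA rest s) = _
        show (if PySem.Str.startswith s (lf ++ "=") then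
                nf ++ PySem.Str.slice s (some (PySem.Str.len lf)) none
              else pvScanA rest s) = _
        rw [hsw, hbeq]
        simp only [if_true]
        -- both sides, as code-point lists
        have hsplit : s.toList = lf.toList ++ s.toList.dropWhile (fun c => c != '=') := by
          conv_lhs => rw [← List.takeWhile_append_dropWhile (p := fun c => c != '=') (l := s.toList)]
          rw [hkey]
        have hlen : PySem.Str.len lf = ((lf.toList.length : Nat) : Int) := by
          simp [PySem.Str.len_eq]
        apply String.toList_injective
        rw [String.toList_append, String.toList_append, String.toList_append,
            PySem.Str.toList_slice, PySem.Chars.slice_eq_listSlice,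
            hlen, PySem.List.slice_from_natCast]
        conv_lhs => rw [hsplit, List.drop_left]
        simp only [String.toList_ofList, List.append_assoc, List.append_cancel_left_eq]
        obtain ⟨c, d, hd⟩ : ∃ c d, s.toList.dropWhile (fun c => c != '=') = c :: d := by
          cases hcd : s.toList.dropWhile (fun c => c != '=') with
          | nil => exact absurd hcd hne
          | cons c d => exact ⟨c, d, rfl⟩
        rw [hd]
        simp
      · -- this flag does not match: both move on to the rest of the table
        have hx : (lf ++ "=").toList = lf.toList ++ ['='] := by
          rw [String.toList_append]; rfl
        have hsw : PySem.Str.startswith s (lf ++ "=") = false := by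
          rw [Bool.eq_false_iff]
          intro htrue
          rw [PySem.Str.startswith_eq] at htrue
          exact hkey (hiff.mp (hx ▸ (PySem.Chars.startswith_iff _ _).mp htrue)).1
        have hbeq : (lf == String.ofList (s.toList.takeWhile (fun c => c != '='))) = false := by
          rw [beq_eq_false_iff_ne]
          intro h
          apply hkey
          rw [h]
          simp
        show (if PySem.Str.startswith s (lf ++ "=") then
                nf ++ PySem.Str.slice s (some (PySem.Str.len lf)) none
              else pvScanA rest s) = _
        rw [hsw, hbeq]
        simp only [Bool.false_eq_true, if_false]
        exact ih (fun p hp => hl p (by simp [hp]))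

theorem pv_flags_no_eq : ∀ p ∈ pvLegacyList, '=' ∉ p.1.toList := by decide

-- pointwise: A's per-argument step equals B's rewrite
theorem pv_step (arg : String) : pvStepA arg = pvRewriteB arg := by
  have hitems : PySem.Dict.items pvLegacyFlags = pvLegacyList := rfl
  unfold pvStepA pvRewriteB
  by_cases h : arg.toList.dropWhile (fun c => c != '=') = []
  · -- no '=' in arg: key = arg, sep = value = ''
    have htake : arg.toList.takeWhile (fun c => c != '=') = arg.toList := by
      conv_rhs => rw [← List.takeWhile_append_dropWhile (p := fun c => c != '=') (l := arg.toList)]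
      rw [h, List.append_nil]
    rw [htake, h]
    simp only [List.take_nil, List.drop_nil, String.ofList_toList]
    cases hget : PySem.Dict.get? pvLegacyFlags arg with
    | some v =>
        apply String.toList_injective
        simp
    | none =>
        rw [hitems]
        exact pv_scan_id arg h pvLegacyList
  · -- arg contains '=': the exact-match branch never fires, the scan is B's lookup
    have hmem : '=' ∈ arg.toList := by
      by_contra hnot
      exact h (List.dropWhile_eq_nil_iff.mpr (fun c hc => by
        simpa using fun hce : c = '=' => hnot (hce ▸ hc)))
    have hnone : PySem.Dict.get? pvLegacyFlags arg = none :=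
      pv_get?_none arg hmem pvLegacyList pv_flags_no_eq
    rw [hnone, hitems]
    exact pv_scan_eq arg h pvLegacyList pv_flags_no_eq

-- ===== VERDICT (by name: the statement is the Claim_ definition above) =====
theorem normalize_legacy_flags_spec : Claim_equal_normalize_legacy_flags := by
  intro argv _
  unfold Spec_normalize_legacy_flags normalize_legacy_flags normalize_legacy_flags_alt
  rw [PySem.List.foldl_append_singleton_eq_map pvStepA argv []]
  simp [funext pv_step]
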